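-- pv_equiv track=rewrite | github.com/SeoHyeonMyeong/Coding-test-study-kakao | test/무지의_먹방_라이브.py | solution
-- ===== SOURCE A (Python) =====
-- from itertools import accumulate
--
-- def solution(food_times, k):
--     N = len(food_times)
--     food = [False] * N
--
--     # k가 N보다 작다면 결론 도출
--     if k < N: return k + 1
--
--     # 누적 합계를 순서대로 정렬
--     food = sorted(food_times)
--     food_acc = list(accumulate(food))
--
--     # 몇번째 회전 루프에 k가 속하는지 판단하기
--     limit_food = -1
--     for i in range(N):
--         limit = food_acc[i] + (N-(i+1)) * food[i]
--         if limit > k: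
--             limit_food = food[i]
--             # k에서 이전 회차 루프 횟수 빼기
--             k -= food_acc[i-1] + (N-i) * food[i-1]
--             break
--
--     # 답이 없다면 -1 반환
--     if limit_food == -1:
--         return -1
--
--     # 남은 음식
--     remain_food = [idx for idx, food in enumerate(food_times) if food >= limit_food]
--     return remain_food[k % len(remain_food)] + 1
-- ===== SOURCE B (Python) =====
-- def solution(food_times, k):
--     n = len(food_times)
--     if k < n:
--         return k + 1
--     if sum(food_times) <= k:
--         return -1
--     # binary search the largest integer time T (0 <= T < max) such that the
--     # seconds consumed once every food has been bitten min(f, T) times is <= k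
--     def eaten(T):
--         return sum(min(f, T) for f in food_times)
--     lo, hi = 0, max(food_times)   # eaten(lo) <= k < eaten(hi)
--     while hi - lo > 1:
--         mid = (lo + hi) // 2
--         if eaten(mid) <= k:
--             lo = mid
--         else:
--             hi = mid
--     r = k - eaten(lo)
--     survivors = [i for i, f in enumerate(food_times) if f > lo]
--     return survivors[r % len(survivors)] + 1
-- ===== Notes on version B (the rewrite author's own statement) =====
-- stated objective: alternative
-- what changed: B does not sort at all: it binary-searches the largest bite-count threshold T with sum(min(f,T)) <= k over [0, max(food_times)], replacing A's sort + accumulate prefix-sum table + linear scan for the break level; the survivors and offset then come from T directly.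
-- intended difference: When the stop happens inside the first sorted level (n <= k < n*min(food_times)) and sum(food_times) % n != 0, A's 'food_acc[i-1]' with i=0 wraps to the LAST element and subtracts sum+n*max from k, returning a rotated wrong index (e.g. A([2,5],2)=2), while B subtracts nothing and returns the intended food (B([2,5],2)=1). — e.g. on solution([2, 5], 2): A returns 2, B returns 1
import Mathlib
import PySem

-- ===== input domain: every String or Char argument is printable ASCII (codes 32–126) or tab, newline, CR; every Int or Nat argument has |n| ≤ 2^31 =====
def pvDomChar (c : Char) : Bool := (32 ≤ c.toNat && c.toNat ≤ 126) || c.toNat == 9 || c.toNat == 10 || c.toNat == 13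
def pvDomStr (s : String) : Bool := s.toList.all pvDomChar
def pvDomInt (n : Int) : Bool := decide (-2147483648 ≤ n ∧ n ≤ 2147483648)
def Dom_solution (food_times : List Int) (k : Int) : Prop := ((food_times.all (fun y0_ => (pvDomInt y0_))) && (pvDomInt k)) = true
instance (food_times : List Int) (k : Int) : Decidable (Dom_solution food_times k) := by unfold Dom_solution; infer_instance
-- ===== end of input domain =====

-- B drops the sort entirely: a binary search on the bite-count threshold T with
-- sum(min(f,T)) ≤ k replaces A's sort + accumulate table + linear scan (objective: alternative).

-- ===== PORT A =====
-- list(accumulate(food))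
def pyAccumulate (xs : List Int) : List Int :=
  (xs.foldl (fun st x => (st.1 ++ [st.2 + x], st.2 + x)) (([] : List Int), (0 : Int))).1

-- the for-i-in-range(N) loop with break: returns (limit_food, k)
def aLoop (food facc : List Int) (N k : Int) : List Int → Int × Int
  | [] => (-1, k)
  | i :: rest =>
    let limit := PySem.List.pyGetD facc i 0 + (N - (i + 1)) * PySem.List.pyGetD food i 0
    if limit > k then
      (PySem.List.pyGetD food i 0,
        k - (PySem.List.pyGetD facc (i - 1) 0 + (N - i) * PySem.List.pyGetD food (i - 1) 0))
    else aLoop food facc N k rest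

def solution (food_times : List Int) (k : Int) : Int :=
  let N : Int := (food_times.length : Int)
  let _food : List Bool := List.replicate food_times.length false
  if k < N then k + 1
  else
    let food := PySem.List.sorted food_times (fun x => x) false
    let food_acc := pyAccumulate food
    let r := aLoop food food_acc N k (PySem.List.pyRange 0 N 1)
    if r.1 = -1 then -1
    else
      let remain := ((PySem.List.enumerate food_times 0).filter (fun p => p.2 ≥ r.1)).map (fun p => p.1)
      PySem.List.pyGetD remain (PySem.Int.mod r.2 (remain.length : Int)) 0 + 1

-- ===== PORT B =====
-- sum(min(f, T) for f in food_times)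
def bEaten (food_times : List Int) (T : Int) : Int :=
  (food_times.map (fun f => min f T)).sum

-- the while hi - lo > 1 binary-search loop; returns the final lo
def bSearch (food_times : List Int) (k lo hi : Int) : Int :=
  if _h : 1 < hi - lo then
    if bEaten food_times (PySem.Int.floordiv (lo + hi) 2) ≤ k then
      bSearch food_times k (PySem.Int.floordiv (lo + hi) 2) hi
    else
      bSearch food_times k lo (PySem.Int.floordiv (lo + hi) 2)
  else lo
termination_by (hi - lo).toNat
decreasing_by
  all_goals
    rw [PySem.Int.floordiv_eq_ediv_of_pos (by norm_num : (0:Int) < 2)]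
    omega

def solution_alt (food_times : List Int) (k : Int) : Int :=
  let n : Int := (food_times.length : Int)
  if k < n then k + 1
  else if food_times.sum ≤ k then -1
  else
    let mx := (PySem.List.max? food_times (fun x => x)).getD 0
    let lo := bSearch food_times k 0 mx
    let r := k - bEaten food_times lo
    let survivors := ((PySem.List.enumerate food_times 0).filter (fun p => lo < p.2)).map (fun p => p.1)
    PySem.List.pyGetD survivors (PySem.Int.mod r (survivors.length : Int)) 0 + 1

-- ===== PRECONDITION & SPEC =====
-- When the stop falls inside the first sorted level (n ≤ k < n·min) and sum % n ≠ 0,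
-- A's food_acc[i-1]/food[i-1] with i=0 wrap to the LAST element (Python negative indexing),
-- so A subtracts sum + n·max from k and returns a rotated wrong food; B subtracts nothing,
-- which is the intended value.
def D_solution (food_times : List Int) (k : Int) : Prop :=
  food_times ≠ [] ∧ (food_times.length : Int) ≤ k ∧
  (∀ t ∈ food_times, k < (food_times.length : Int) * t) ∧
  PySem.Int.mod food_times.sum (food_times.length : Int) ≠ 0
instance (food_times : List Int) (k : Int) : Decidable (D_solution food_times k) := by
  unfold D_solution; infer_instance

def Spec_solution (food_times : List Int) (k : Int) (out : Int) : Prop :=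
  ¬ D_solution food_times k → out = solution_alt food_times k
instance (food_times : List Int) (k : Int) (out : Int) : Decidable (Spec_solution food_times k out) := by
  unfold Spec_solution; infer_instance

def pvDiffWitness_solution : List Int × Int := ([2, 5], 2)
def pvDiffWitnessOut_solution : Int × Int := (2, 1)

-- ===== CLAIM (what is proved, stated in full; the proofs are below) =====
def Claim_unchanged_solution : Prop := ∀ (food_times : List Int) (k : Int), Dom_solution food_times k → Spec_solution food_times k (solution food_times k)
def Claim_changed_solution : Prop := Dom_solution (pvDiffWitness_solution.1) (pvDiffWitness_solution.2) ∧ D_solution (pvDiffWitness_solution.1) (pvDiffWitness_solution.2) ∧ solution (pvDiffWitness_solution.1) (pvDiffWitness_solution.2) = pvDiffWitnessOut_solution.1 ∧ solution_alt (pvDiffWitness_solution.1) (pvDiffWitness_solution.2) = pvDiffWitnessOut_solution.2 ∧ pvDiffWitnessOut_solution.1 ≠ pvDiffWitnessOut_solution.2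
def Claim_exact_solution : Prop := ∀ (food_times : List Int) (k : Int), Dom_solution food_times k → D_solution food_times k → solution food_times k ≠ solution_alt food_times k

-- ===== LEMMAS AND PROOFS =====

-- running-sum list: pvScan c xs = [c+x0, c+x0+x1, …]
def pvScan : Int → List Int → List Int
  | _, [] => []
  | c, x :: xs => (c + x) :: pvScan (c + x) xs

lemma pvScan_foldl (xs : List Int) : ∀ (acc : List Int) (c : Int),
    xs.foldl (fun st x => (st.1 ++ [st.2 + x], st.2 + x)) (acc, c)
      = (acc ++ pvScan c xs, c + xs.sum) := by
  induction xs with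
  | nil => intro acc c; simp [pvScan]
  | cons x xs ih => intro acc c; simp [pvScan, ih, add_assoc]

lemma pyAccumulate_eq (xs : List Int) : pyAccumulate xs = pvScan 0 xs := by
  simp [pyAccumulate, pvScan_foldl]

lemma length_pvScan (xs : List Int) : ∀ c, (pvScan c xs).length = xs.length := by
  induction xs with
  | nil => intro c; rfl
  | cons x xs ih => intro c; simp [pvScan, ih]

lemma pvScan_append (xs ys : List Int) : ∀ c,
    pvScan c (xs ++ ys) = pvScan c xs ++ pvScan (c + xs.sum) ys := by
  induction xs with
  | nil => intro c; simp [pvScan]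
  | cons x xs ih => intro c; simp [pvScan, ih, add_assoc]

lemma pvScan_getLast? (xs : List Int) (h : xs ≠ []) : ∀ c, (pvScan c xs).getLast? = some (c + xs.sum) := by
  induction xs with
  | nil => exact absurd rfl h
  | cons x xs ih =>
    intro c
    cases xs with
    | nil => simp [pvScan]
    | cons y ys =>
      rw [pvScan, pvScan, List.getLast?_cons_cons]
      rw [show (c + x + y) :: pvScan (c + x + y) ys = pvScan (c + x) (y :: ys) by simp [pvScan], ih (by simp)]
      simp [add_assoc]

lemma pvGetD_append (P l : List Int) (y d : Int) :
    PySem.List.pyGetD (P ++ y :: l) ((P.length : Nat) : Int) d = y := by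
  simp [PySem.List.pyGetD_natCast, List.getD]

lemma pvCountP_enumerate (food_times : List Int) (pred : Int → Bool) :
    List.countP (fun p : Int × Int => pred p.2) (PySem.List.enumerate food_times 0)
      = List.countP pred food_times := by
  conv_rhs => rw [← PySem.List.map_snd_enumerate food_times 0]
  rw [List.countP_map]
  rfl

-- A's sorted loop, rephrased as one incremental pass over the sorted times
-- (proof-only intermediate between the two ports)
def pvSLoop (food_times : List Int) : Int → Int → Int → List Int → Int
  | _, _, _, [] => -1
  | k, prev, remaining, t :: rest =>
    let block := (t - prev) * remaining
    if k < block then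
      let survivors := ((PySem.List.enumerate food_times 0).filter (fun p => p.2 ≥ t)).map (fun p => p.1)
      PySem.List.pyGetD survivors (PySem.Int.mod k remaining) 0 + 1
    else pvSLoop food_times (k - block) t (remaining - 1) rest

lemma pvLoop_agree (food_times : List Int) (k : Int)
    (hk : (food_times.length : Int) ≤ k)
    (hND : ¬ D_solution food_times k) :
    ∀ (suf pre : List Int) (prev kB : Int),
      (pre ++ suf).Perm food_times →
      (pre ++ suf).Pairwise (fun a b : Int => a ≤ b) →
      ((pre = [] ∧ prev = 0 ∧ kB = k) ∨
        ((∃ q, pre = q ++ [prev]) ∧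
          kB = k - (pre.sum + ((food_times.length : Int) - pre.length) * prev))) →
      (∀ x ∈ pre, x ≤ prev) →
      0 ≤ kB →
      (let r := aLoop (pre ++ suf) (pvScan 0 (pre ++ suf)) (food_times.length : Int) k
          (PySem.List.pyRange (pre.length : Int) (food_times.length : Int) 1)
       if r.1 = -1 then (-1 : Int)
       else
         let remain := ((PySem.List.enumerate food_times 0).filter (fun p => p.2 ≥ r.1)).map (fun p => p.1)
         PySem.List.pyGetD remain (PySem.Int.mod r.2 (remain.length : Int)) 0 + 1)
      = pvSLoop food_times kB prev ((food_times.length : Int) - pre.length) suf := by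
  intro suf
  induction suf with
  | nil =>
    intro pre prev kB hperm hpair hinv hpre hkB
    have hlen : pre.length = food_times.length := by simpa using hperm.length_eq
    rw [PySem.List.pyRange_one_eq_nil (by exact_mod_cast hlen.ge)]
    simp [aLoop, pvSLoop]
  | cons t rest ih =>
    intro pre prev kB hperm hpair hinv hpre hkB
    have hlen : pre.length + (rest.length + 1) = food_times.length := by
      simpa using hperm.length_eq
    have hiN : ((pre.length : Nat) : Int) < (food_times.length : Int) := by
      exact_mod_cast (show pre.length < food_times.length by omega)
    have hfood_i : PySem.List.pyGetD (pre ++ t :: rest) ((pre.length : Nat) : Int) 0 = t :=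
      pvGetD_append pre rest t 0
    have hfacc_i : PySem.List.pyGetD (pvScan 0 (pre ++ t :: rest)) ((pre.length : Nat) : Int) 0
        = pre.sum + t := by
      rw [pvScan_append,
        show pvScan (0 + pre.sum) (t :: rest) = (0 + pre.sum + t) :: pvScan (0 + pre.sum + t) rest from rfl,
        show ((pre.length : Nat) : Int) = (((pvScan 0 pre).length : Nat) : Int) by rw [length_pvScan],
        pvGetD_append]
      ring
    have hMpos : (0 : Int) < (food_times.length : Int) - (pre.length : Int) := by
      have : pre.length < food_times.length := by omega
      omega
    have hcond : (pre.sum + t + ((food_times.length : Int) - (((pre.length : Nat) : Int) + 1)) * t > k)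
        ↔ (kB < (t - prev) * ((food_times.length : Int) - (pre.length : Int))) := by
      rcases hinv with ⟨hpe, hprev0, hkBk⟩ | ⟨⟨q, hq⟩, hkBv⟩
      · subst hpe hprev0
        rw [hkBk]
        simp only [List.sum_nil, List.length_nil, Nat.cast_zero, zero_add, sub_zero]
        have he : t + ((food_times.length : Int) - (0 + 1)) * t
            = (t - 0) * ((food_times.length : Int) - 0) := by ring
        constructor <;> intro h <;> linarith
      · have he : pre.sum + t + ((food_times.length : Int) - (((pre.length : Nat) : Int) + 1)) * t
            - (pre.sum + ((food_times.length : Int) - (pre.length : Int)) * prev)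
            = (t - prev) * ((food_times.length : Int) - (pre.length : Int)) := by ring
        constructor <;> intro h <;> linarith [he, hkBv]
    have hprevle : ∀ x ∈ pre, x ≤ t := by
      intro x hx
      rcases hinv with ⟨hpe, _, _⟩ | ⟨⟨q, hq⟩, _⟩
      · subst hpe; simp at hx
      · have hpm : prev ∈ pre := by subst hq; simp
        exact le_trans (hpre x hx) ((List.pairwise_append.mp hpair).2.2 prev hpm t (by simp))
    rw [PySem.List.pyRange_one_cons hiN]
    simp only [aLoop, pvSLoop, hfood_i, hfacc_i]
    by_cases hbr : pre.sum + t + ((food_times.length : Int) - (((pre.length : Nat) : Int) + 1)) * t > k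
    · -- BREAK: both sides stop at this level
      rw [if_pos hbr, if_pos (hcond.mp hbr)]
      have ht2 : 2 ≤ t := by
        have hsum : pre.sum ≤ (pre.length : Int) * t := by
          have h1 := List.sum_le_card_nsmul pre t hprevle
          calc pre.sum ≤ (pre.length • t : Int) := h1
            _ = (pre.length : Int) * t := by push_cast [nsmul_eq_mul]; ring
        have hNpos : (0 : Int) < (food_times.length : Int) := by
          exact_mod_cast (show 0 < food_times.length by omega)
        nlinarith [hk]
      rw [if_neg (show ¬ t = -1 by omega)]
      have hrestge : ∀ y ∈ rest, t ≤ y := by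
        have h1 := (List.pairwise_append.mp hpair).2.1
        exact (List.pairwise_cons.mp h1).1
      have hcount : List.countP (fun x : Int => decide (x ≥ t)) food_times = rest.length + 1 := by
        rw [← (List.Perm.countP_eq _ hperm), List.countP_append,
          List.countP_cons_of_pos (by simp)]
        have hz : List.countP (fun x : Int => decide (x ≥ t)) pre = 0 := by
          rw [List.countP_eq_zero]
          intro x hx
          rcases hinv with ⟨hpe, _, _⟩ | ⟨⟨q, hq⟩, hkBv⟩
          · subst hpe; simp at hx
          · have hprevlt : prev < t := by
              have h2 := hcond.mp hbr
              nlinarith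
            simpa using not_le.mpr (lt_of_le_of_lt (hpre x hx) hprevlt)
        have hf : List.countP (fun x : Int => decide (x ≥ t)) rest = rest.length := by
          rw [List.countP_eq_length]
          intro y hy; simpa using hrestge y hy
        omega
      have hremlen : (((PySem.List.enumerate food_times 0).filter
            (fun p : Int × Int => decide (p.2 ≥ t))).map (fun p => p.1)).length = rest.length + 1 := by
        rw [List.length_map, ← List.countP_eq_length_filter, pvCountP_enumerate food_times
          (fun x : Int => decide (x ≥ t)), hcount]
      have hrem2 : ((food_times.length : Int)) - (pre.length : Int) = ((rest.length : Int)) + 1 := by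
        omega
      rcases hinv with ⟨hpe, hprev0, hkBk⟩ | ⟨⟨q, hq⟩, hkBv⟩
      · -- i = 0 : Python wraparound reads the LAST entries; outside D_ the shift is ≡ 0 (mod N)
        subst hpe hprev0
        rw [hkBk]
        simp only [List.nil_append, List.length_nil, Nat.cast_zero, List.sum_nil, zero_sub,
          zero_add, sub_zero] at hbr hremlen hrem2 ⊢
        have hne2 : (t :: rest) ≠ [] := List.cons_ne_nil t rest
        have hfood_m : PySem.List.pyGetD (t :: rest) (-1 : Int) 0
            = (t :: rest).getLast hne2 := PySem.List.pyGetD_neg_one _ 0 hne2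
        have hfacc_ne : pvScan 0 (t :: rest) ≠ [] := by simp [pvScan]
        have hfacc_m : PySem.List.pyGetD (pvScan 0 (t :: rest)) (-1 : Int) 0
            = (t :: rest).sum := by
          rw [PySem.List.pyGetD_neg_one _ 0 hfacc_ne]
          have h2 := pvScan_getLast? (t :: rest) (by simp) 0
          rw [List.getLast?_eq_some_getLast hfacc_ne] at h2
          have h3 := Option.some.inj h2
          omega
        rw [hfood_m, hfacc_m]
        have hne : food_times ≠ [] := by
          intro h; rw [h] at hlen; simp at hlen
        have hNpos : (0 : Int) < (food_times.length : Int) := by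
          exact_mod_cast (show 0 < food_times.length by omega)
        have hallmem : ∀ u ∈ food_times, k < (food_times.length : Int) * u := by
          intro u hu
          have htu : t ≤ u := by
            have hmem : u ∈ t :: rest := hperm.mem_iff.mpr hu
            rcases List.mem_cons.mp hmem with h | h
            · omega
            · exact hrestge u h
          nlinarith
        have hmod0 : PySem.Int.mod food_times.sum (food_times.length : Int) = 0 := by
          by_contra hm
          exact hND ⟨hne, hk, hallmem, hm⟩
        obtain ⟨c, hc⟩ := (PySem.Int.mod_eq_zero_iff_dvd _ _).mp hmod0
        have hsum_eq : (t :: rest).sum = food_times.sum := hperm.sum_eq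
        have hmeq : PySem.Int.mod
              (k - ((t :: rest).sum + (food_times.length : Int) * (t :: rest).getLast hne2))
              ((food_times.length : Int))
            = PySem.Int.mod k ((food_times.length : Int)) := by
          rw [PySem.Int.mod_eq_emod_of_pos hNpos, PySem.Int.mod_eq_emod_of_pos hNpos]
          rw [hsum_eq, hc,
            show k - ((food_times.length : Int) * c + (food_times.length : Int)
              * (t :: rest).getLast hne2)
              = k - (food_times.length : Int) * (c + (t :: rest).getLast hne2) by ring]
          exact Int.sub_mul_emod_self_left _ _ _
        rw [hremlen]
        rw [show ((rest.length + 1 : Nat) : Int) = (food_times.length : Int) by omega, hmeq]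
      · -- i ≥ 1 : A subtracts exactly the block total B has already subtracted
        have hidx : ((pre.length : Nat) : Int) - 1 = ((q.length : Nat) : Int) := by
          subst hq; simp
        have happ2 : pre ++ t :: rest = q ++ prev :: t :: rest := by
          subst hq; simp
        have hfood_m : PySem.List.pyGetD (pre ++ t :: rest) (((pre.length : Nat) : Int) - 1) 0
            = prev := by
          rw [hidx, happ2]; exact pvGetD_append q (t :: rest) prev 0
        have hfacc_m : PySem.List.pyGetD (pvScan 0 (pre ++ t :: rest)) (((pre.length : Nat) : Int) - 1) 0
            = pre.sum := by
          rw [hidx, happ2, pvScan_append,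
            show pvScan (0 + q.sum) (prev :: t :: rest)
              = (0 + q.sum + prev) :: pvScan (0 + q.sum + prev) (t :: rest) from rfl,
            show ((q.length : Nat) : Int) = (((pvScan 0 q).length : Nat) : Int) by rw [length_pvScan],
            pvGetD_append]
          subst hq; simp
        rw [hfood_m, hfacc_m, hremlen, ← hkBv, hrem2]
        rw [show ((rest.length + 1 : Nat) : Int) = ((rest.length : Int)) + 1 by omega]
    · -- CONTINUE: both sides move to the next level
      have hnb : ¬ kB < (t - prev) * ((food_times.length : Int) - (pre.length : Int)) :=
        fun h => hbr (hcond.mpr h)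
      rw [if_neg hbr, if_neg hnb]
      have happ : pre ++ t :: rest = (pre ++ [t]) ++ rest := by simp
      have H := ih (pre ++ [t]) t (kB - (t - prev) * ((food_times.length : Int) - (pre.length : Int)))
        (by rw [← happ]; exact hperm)
        (by rw [← happ]; exact hpair)
        (Or.inr ⟨⟨pre, rfl⟩, by
          rcases hinv with ⟨hpe, hprev0, hkBk⟩ | ⟨⟨q, hq⟩, hkBv⟩
          · subst hpe hprev0
            rw [hkBk]
            simp only [List.sum_nil, List.length_nil, List.sum_cons, List.length_cons,
              List.nil_append]
            push_cast
            ring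
          · rw [hkBv]
            simp only [List.sum_append, List.length_append, List.sum_cons, List.length_cons,
              List.sum_nil, List.length_nil]
            push_cast
            ring⟩)
        (by
          intro x hx
          rcases List.mem_append.mp hx with h | h
          · exact hprevle x h
          · simp at h; omega)
        (by omega)
      rw [happ]
      have hc1 : ((pre.length : Nat) : Int) + 1 = (((pre ++ [t]).length : Nat) : Int) := by
        simp
      have hc2 : (food_times.length : Int) - ((pre ++ [t]).length : Int)
          = (food_times.length : Int) - (pre.length : Int) - 1 := by
        simp only [List.length_append, List.length_cons, List.length_nil]
        push_cast
        ring
      rw [hc1]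
      rw [hc2] at H
      exact H

-- ---- B-side lemmas ----

lemma eaten_mono (food_times : List Int) {T T' : Int} (h : T ≤ T') :
    bEaten food_times T ≤ bEaten food_times T' := by
  unfold bEaten
  apply List.sum_le_sum
  intro f _
  exact min_le_min le_rfl h

lemma eaten_le_sum (food_times : List Int) (T : Int) :
    bEaten food_times T ≤ food_times.sum := by
  unfold bEaten
  calc (food_times.map (fun f => min f T)).sum
      ≤ (food_times.map (fun f => f)).sum := List.sum_le_sum (fun f _ => min_le_left f T)
    _ = food_times.sum := by simp

lemma eaten_zero_nonpos (food_times : List Int) : bEaten food_times 0 ≤ 0 := by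
  unfold bEaten
  calc (food_times.map (fun f => min f 0)).sum
      ≤ (food_times.map (fun _ => (0 : Int))).sum :=
        List.sum_le_sum (fun f _ => min_le_right f 0)
    _ = 0 := by simp

lemma eaten_split (food_times pre suf : List Int) (T : Int)
    (hperm : (pre ++ suf).Perm food_times)
    (hpre : ∀ x ∈ pre, x ≤ T) (hsuf : ∀ y ∈ suf, T ≤ y) :
    bEaten food_times T = pre.sum + T * (suf.length : Int) := by
  unfold bEaten
  rw [← (hperm.map (fun f => min f T)).sum_eq, List.map_append, List.sum_append]
  have h1 : pre.map (fun f => min f T) = pre.map (fun f => f) := by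
    apply List.map_congr_left
    intro x hx
    exact min_eq_left (hpre x hx)
  have h2 : suf.map (fun f => min f T) = suf.map (fun _ => T) := by
    apply List.map_congr_left
    intro y hy
    exact min_eq_right (hsuf y hy)
  rw [h1, h2]
  simp [mul_comm]

lemma bSearch_spec (food_times : List Int) (k : Int) :
    ∀ (n : Nat) (lo hi : Int), (hi - lo).toNat = n → lo < hi →
      bEaten food_times lo ≤ k → ¬ bEaten food_times hi ≤ k →
      lo ≤ bSearch food_times k lo hi ∧ bSearch food_times k lo hi < hi ∧
      bEaten food_times (bSearch food_times k lo hi) ≤ k ∧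
      ¬ bEaten food_times (bSearch food_times k lo hi + 1) ≤ k := by
  intro n
  induction n using Nat.strong_induction_on with
  | _ n ih =>
    intro lo hi hn hlt hplo hphi
    rw [bSearch]
    by_cases hgap : 1 < hi - lo
    · rw [dif_pos hgap]
      have hmid : PySem.Int.floordiv (lo + hi) 2 = (lo + hi) / 2 :=
        PySem.Int.floordiv_eq_ediv_of_pos (by norm_num)
      by_cases hp : bEaten food_times (PySem.Int.floordiv (lo + hi) 2) ≤ k
      · rw [if_pos hp]
        exact ⟨by
          have := (ih ((hi - PySem.Int.floordiv (lo + hi) 2).toNat)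
            (by rw [hmid]; omega) (PySem.Int.floordiv (lo + hi) 2) hi rfl
            (by rw [hmid]; omega) hp hphi)
          have hlom : lo ≤ PySem.Int.floordiv (lo + hi) 2 := by rw [hmid]; omega
          exact le_trans hlom this.1,
          (ih ((hi - PySem.Int.floordiv (lo + hi) 2).toNat)
            (by rw [hmid]; omega) (PySem.Int.floordiv (lo + hi) 2) hi rfl
            (by rw [hmid]; omega) hp hphi).2.1,
          (ih ((hi - PySem.Int.floordiv (lo + hi) 2).toNat)
            (by rw [hmid]; omega) (PySem.Int.floordiv (lo + hi) 2) hi rfl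
            (by rw [hmid]; omega) hp hphi).2.2.1,
          (ih ((hi - PySem.Int.floordiv (lo + hi) 2).toNat)
            (by rw [hmid]; omega) (PySem.Int.floordiv (lo + hi) 2) hi rfl
            (by rw [hmid]; omega) hp hphi).2.2.2⟩
      · rw [if_neg hp]
        have H := ih ((PySem.Int.floordiv (lo + hi) 2 - lo).toNat)
          (by rw [hmid]; omega) lo (PySem.Int.floordiv (lo + hi) 2) rfl
          (by rw [hmid]; omega) hplo hp
        exact ⟨H.1, lt_trans H.2.1 (by rw [hmid]; omega), H.2.2.1, H.2.2.2⟩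
    · rw [dif_neg hgap]
      have hhi : hi = lo + 1 := by omega
      exact ⟨le_rfl, by omega, hplo, by rw [← hhi]; exact hphi⟩

-- the fixed else-branch of solution_alt, as one expression
lemma sloop_eq_alt (food_times : List Int) (k : Int) (hk0 : 0 ≤ k) :
    ∀ (suf pre : List Int) (prev kB : Int),
      (pre ++ suf).Perm food_times →
      (pre ++ suf).Pairwise (fun a b : Int => a ≤ b) →
      kB = k - (pre.sum + prev * (suf.length : Int)) →
      (∀ x ∈ pre, x ≤ prev) →
      ((pre = [] ∧ prev = 0) ∨ (∀ y ∈ suf, prev ≤ y)) →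
      0 ≤ kB →
      pvSLoop food_times kB prev ((suf.length : Nat) : Int) suf
        = (if food_times.sum ≤ k then (-1 : Int)
           else
             let mx := (PySem.List.max? food_times (fun x => x)).getD 0
             let lo := bSearch food_times k 0 mx
             let r := k - bEaten food_times lo
             let survivors := ((PySem.List.enumerate food_times 0).filter
               (fun p => lo < p.2)).map (fun p => p.1)
             PySem.List.pyGetD survivors (PySem.Int.mod r (survivors.length : Int)) 0 + 1) := by
  intro suf
  induction suf with
  | nil =>
    intro pre prev kB hperm hpair harith hxpre hdisj hkB
    have hsum : pre.sum = food_times.sum := by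
      have := hperm.sum_eq
      simpa using this
    have hle : food_times.sum ≤ k := by
      rw [← hsum]
      simp at harith
      omega
    rw [if_pos hle]
    simp [pvSLoop]
  | cons t rest ih =>
    intro pre prev kB hperm hpair harith hxpre hdisj hkB
    have hL : ((((t :: rest).length : Nat)) : Int) = ((rest.length : Int)) + 1 := by
      push_cast [List.length_cons]; ring
    have hLpos : (0 : Int) < (((t :: rest).length : Nat) : Int) := by
      rw [hL]; positivity
    have hsufge : ∀ y ∈ t :: rest, t ≤ y := by
      intro y hy
      rcases List.mem_cons.mp hy with h | h
      · omega
      · exact ((List.pairwise_cons.mp (List.pairwise_append.mp hpair).2.1).1) y h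
    simp only [pvSLoop]
    set L : Int := (((t :: rest).length : Nat) : Int) with hLdef
    by_cases hbr : kB < (t - prev) * L
    · -- break at level t on the A side
      rw [if_pos hbr]
      have hprevt : prev < t := by nlinarith
      have hpreT : ∀ x ∈ pre, x ≤ prev := hxpre
      -- sum(food) > k
      have heat_t : bEaten food_times t = pre.sum + t * L := by
        apply eaten_split food_times pre (t :: rest) t hperm
        · intro x hx; exact le_of_lt (lt_of_le_of_lt (hxpre x hx) hprevt)
        · exact hsufge
      have hsumgt : ¬ food_times.sum ≤ k := by
        have h1 : bEaten food_times t ≤ food_times.sum := eaten_le_sum food_times t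
        have h2 : k < bEaten food_times t := by rw [heat_t]; nlinarith
        omega
      rw [if_neg hsumgt]
      -- max of food
      have hfne : food_times ≠ [] := by
        intro h
        have := hperm.length_eq
        rw [h] at this
        simp at this
      obtain ⟨mx0, hmx0⟩ : ∃ m, PySem.List.max? food_times (fun x => x) = some m := by
        cases hm : PySem.List.max? food_times (fun x => x) with
        | none => exact absurd ((PySem.List.max?_eq_none_iff _ _).mp hm) hfne
        | some m => exact ⟨m, rfl⟩
      have hmxmem : mx0 ∈ food_times := PySem.List.max?_mem hmx0
      have hmxub : ∀ y ∈ food_times, y ≤ mx0 := by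
        have := PySem.List.max?_isMax hmx0
        simpa using this
      have heat_mx : bEaten food_times mx0 = food_times.sum := by
        unfold bEaten
        rw [show food_times.map (fun f => min f mx0) = food_times.map (fun f => f) from
          List.map_congr_left (fun x hx => min_eq_left (hmxub x hx))]
        simp
      have hmxgt : ¬ bEaten food_times mx0 ≤ k := by rw [heat_mx]; exact hsumgt
      have hz : bEaten food_times 0 ≤ k := le_trans (eaten_zero_nonpos food_times) hk0
      have hmxpos : 0 < mx0 := by
        by_contra h
        exact hmxgt (le_trans (eaten_mono food_times (by omega)) hz)
      -- binary search result
      have HS := bSearch_spec food_times k (mx0 - 0).toNat 0 mx0 rfl hmxpos hz hmxgt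
      simp only [hmx0, Option.getD_some]
      set T : Int := bSearch food_times k 0 mx0 with hT
      obtain ⟨hT0, hTmx, hTle, hTgt⟩ := HS
      -- T < t
      have hTt : T < t := by
        by_contra h
        have : bEaten food_times t ≤ bEaten food_times T := eaten_mono food_times (by omega)
        have : k < bEaten food_times T := by
          have h2 : k < bEaten food_times t := by rw [heat_t]; nlinarith
          omega
        omega
      -- prev ≤ T
      have hprevT : prev ≤ T := by
        rcases hdisj with ⟨hpe, hp0⟩ | hsufprev
        · omega
        · by_contra h
          have heat_prev : bEaten food_times prev = pre.sum + prev * L :=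
            eaten_split food_times pre (t :: rest) prev hperm hxpre hsufprev
          have h1 : bEaten food_times (T + 1) ≤ bEaten food_times prev :=
            eaten_mono food_times (by omega)
          have h2 : bEaten food_times prev ≤ k := by rw [heat_prev]; omega
          exact hTgt (le_trans h1 h2)
      -- survivors coincide
      have hfilt : (PySem.List.enumerate food_times 0).filter (fun p => T < p.2)
          = (PySem.List.enumerate food_times 0).filter (fun p => p.2 ≥ t) := by
        apply List.filter_congr
        intro p hp
        obtain ⟨j, hj, hpj⟩ := (PySem.List.mem_enumerate_iff _ _ _).mp hp
        have hmem : p.2 ∈ food_times := by rw [hpj]; exact List.getElem_mem hj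
        have hmem2 : p.2 ∈ pre ++ t :: rest := hperm.symm.subset hmem
        have hiff : (T < p.2) ↔ (p.2 ≥ t) := by
          constructor
          · intro h
            rcases List.mem_append.mp hmem2 with h1 | h1
            · exact absurd h (not_lt.mpr (le_trans (hxpre p.2 h1) hprevT))
            · exact hsufge p.2 h1
          · intro h; omega
        simp [hiff]
      -- count of survivors = L
      have hcount : List.countP (fun x : Int => decide (x ≥ t)) food_times = (t :: rest).length := by
        rw [← (List.Perm.countP_eq _ hperm), List.countP_append]
        have hz' : List.countP (fun x : Int => decide (x ≥ t)) pre = 0 := by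
          rw [List.countP_eq_zero]
          intro x hx
          simpa using not_le.mpr (lt_of_le_of_lt (hxpre x hx) hprevt)
        have hf : List.countP (fun x : Int => decide (x ≥ t)) (t :: rest) = (t :: rest).length := by
          rw [List.countP_eq_length]
          intro y hy; simpa using hsufge y hy
        omega
      have hslen : ((((PySem.List.enumerate food_times 0).filter
            (fun p => p.2 ≥ t)).map (fun p => p.1)).length : Int) = L := by
        rw [List.length_map, ← List.countP_eq_length_filter, pvCountP_enumerate food_times
          (fun x : Int => decide (x ≥ t)), hcount]
      -- offsets congruent
      have heat_T : bEaten food_times T = pre.sum + T * L := by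
        apply eaten_split food_times pre (t :: rest) T hperm
        · intro x hx; exact le_trans (hxpre x hx) hprevT
        · intro y hy; exact le_trans (le_of_lt hTt) (hsufge y hy)
      have hr : k - bEaten food_times T = kB - L * (T - prev) := by
        rw [heat_T, harith]; ring
      have hmodeq : PySem.Int.mod (k - bEaten food_times T) L = PySem.Int.mod kB L := by
        rw [hr, PySem.Int.mod_eq_emod_of_pos hLpos, PySem.Int.mod_eq_emod_of_pos hLpos]
        exact Int.sub_mul_emod_self_left _ _ _
      simp only [hfilt, hslen, hmodeq]
    · -- continue to the next level
      rw [if_neg hbr]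
      have hxpre' : ∀ x ∈ pre ++ [t], x ≤ t := by
        intro x hx
        rcases List.mem_append.mp hx with h | h
        · rcases hdisj with ⟨hpe, hp0⟩ | hsufprev
          · subst hpe; simp at h
          · exact le_trans (hxpre x h) (hsufprev t (by simp))
        · simp at h; omega
      have H := ih (pre ++ [t]) t (kB - (t - prev) * L)
        (by rwa [show (pre ++ [t]) ++ rest = pre ++ t :: rest by simp])
        (by rw [show (pre ++ [t]) ++ rest = pre ++ t :: rest by simp]; exact hpair)
        (by
          rw [harith, hLdef]
          simp only [List.sum_append, List.sum_cons, List.sum_nil, List.length_cons]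
          push_cast
          ring)
        hxpre'
        (Or.inr (by
          intro y hy
          exact ((List.pairwise_cons.mp (List.pairwise_append.mp hpair).2.1).1) y hy))
        (by omega)
      rw [show ((((t :: rest).length : Nat) : Int)) - 1 = ((rest.length : Nat) : Int) by
        push_cast [List.length_cons]; ring] at *
      exact H

theorem solution_spec : Claim_unchanged_solution := by
  intro food_times k _ hND
  show solution food_times k = solution_alt food_times k
  by_cases hk : k < (food_times.length : Int)
  · simp [solution, solution_alt, hk]
  · have hk0 : 0 ≤ k := by
      have : (0 : Int) ≤ (food_times.length : Int) := by positivity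
      omega
    have hA := pvLoop_agree food_times k (by omega) hND
      (PySem.List.sorted food_times (fun x => x) false) [] 0 k
      (by simpa using PySem.List.sorted_perm food_times (fun x => x) false)
      (by simpa using PySem.List.sorted_pairwise food_times (fun x => x))
      (Or.inl ⟨rfl, rfl, rfl⟩) (by simp) (by omega)
    simp only [List.nil_append, List.length_nil, Nat.cast_zero, sub_zero] at hA
    have hslen : (((PySem.List.sorted food_times (fun x => x) false).length : Nat) : Int)
        = (food_times.length : Int) := by
      exact_mod_cast congrArg (Nat.cast (R := Int))
        (PySem.List.length_sorted food_times (fun x => x) false)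
    have hB := sloop_eq_alt food_times k hk0
      (PySem.List.sorted food_times (fun x => x) false) [] 0 k
      (by simpa using PySem.List.sorted_perm food_times (fun x => x) false)
      (by simpa using PySem.List.sorted_pairwise food_times (fun x => x))
      (by simp)
      (by simp)
      (Or.inl ⟨rfl, rfl⟩)
      (by omega)
    rw [hslen] at hB
    simp only [solution, solution_alt, if_neg hk, pyAccumulate_eq]
    rw [hA, hB]

theorem solution_tight : Claim_exact_solution := by
  intro food_times k _ hD
  obtain ⟨hne, hkN, hall, hmod⟩ := hD
  have hNpos : (0 : Int) < (food_times.length : Int) := by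
    cases food_times with
    | nil => exact absurd rfl hne
    | cons a l => exact_mod_cast Nat.succ_pos l.length
  have hknot : ¬ k < (food_times.length : Int) := not_lt.mpr hkN
  have hk0 : 0 ≤ k := by omega
  obtain ⟨t, rest, hs⟩ : ∃ t rest, PySem.List.sorted food_times (fun x => x) false = t :: rest := by
    cases hsrt : PySem.List.sorted food_times (fun x => x) false with
    | nil =>
      exfalso
      have h1 := PySem.List.sorted_perm food_times (fun x => x) false
      rw [hsrt] at h1
      exact hne h1.symm.eq_nil
    | cons t rest => exact ⟨_, _, rfl⟩
  have hperm : (t :: rest).Perm food_times := by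
    have h1 := PySem.List.sorted_perm food_times (fun x => x) false
    rwa [hs] at h1
  have hpair : List.Pairwise (fun a b : Int => a ≤ b) (t :: rest) := by
    have h1 := PySem.List.sorted_pairwise food_times (fun x => x)
    rw [hs] at h1
    simpa using h1
  have htmin : ∀ y ∈ food_times, t ≤ y := by
    intro y hy
    rcases List.mem_cons.mp (hperm.mem_iff.mpr hy) with h | h
    · omega
    · exact (List.pairwise_cons.mp hpair).1 y h
  have hkt : k < (food_times.length : Int) * t :=
    hall t (hperm.subset (List.mem_cons_self))
  set L : Int := (food_times.length : Int) with hLdef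
  -- ---- evaluate B (binary search stops below the minimum level t) ----
  have heat_all : ∀ T : Int, T ≤ t →
      bEaten food_times T = T * L := by
    intro T hTt
    have := eaten_split food_times [] food_times T (by simp)
      (by intro x hx; simp at hx)
      (by intro y hy; exact le_trans hTt (htmin y hy))
    simpa using this
  have hsumge : L * t ≤ food_times.sum := by
    have h1 : bEaten food_times t ≤ food_times.sum := eaten_le_sum food_times t
    have h2 : bEaten food_times t = t * L := heat_all t le_rfl
    nlinarith
  have hsumgt : ¬ food_times.sum ≤ k := by nlinarith
  obtain ⟨mx0, hmx0⟩ : ∃ m, PySem.List.max? food_times (fun x => x) = some m := by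
    cases hm : PySem.List.max? food_times (fun x => x) with
    | none => exact absurd ((PySem.List.max?_eq_none_iff _ _).mp hm) hne
    | some m => exact ⟨m, rfl⟩
  have hmxub : ∀ y ∈ food_times, y ≤ mx0 := by
    have := PySem.List.max?_isMax hmx0
    simpa using this
  have heat_mx : bEaten food_times mx0 = food_times.sum := by
    unfold bEaten
    rw [show food_times.map (fun f => min f mx0) = food_times.map (fun f => f) from
      List.map_congr_left (fun x hx => min_eq_left (hmxub x hx))]
    simp
  have hmxgt : ¬ bEaten food_times mx0 ≤ k := by rw [heat_mx]; exact hsumgt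
  have hz : bEaten food_times 0 ≤ k := le_trans (eaten_zero_nonpos food_times) hk0
  have hmxpos : 0 < mx0 := by
    by_contra h
    exact hmxgt (le_trans (eaten_mono food_times (by omega)) hz)
  have HS := bSearch_spec food_times k (mx0 - 0).toNat 0 mx0 rfl hmxpos hz hmxgt
  set T : Int := bSearch food_times k 0 mx0 with hT
  obtain ⟨hT0, hTmx, hTle, hTgt⟩ := HS
  have hTt : T < t := by
    by_contra h
    have h1 : bEaten food_times t ≤ bEaten food_times T := eaten_mono food_times (by omega)
    have h2 : bEaten food_times t = t * L := heat_all t le_rfl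
    nlinarith [hTle]
  have hfilter : (PySem.List.enumerate food_times 0).filter (fun p : Int × Int => decide (T < p.2))
      = PySem.List.enumerate food_times 0 := by
    rw [List.filter_eq_self]
    intro p hp
    obtain ⟨j, hj, hpj⟩ := (PySem.List.mem_enumerate_iff _ _ _).mp hp
    have : t ≤ p.2 := by rw [hpj]; exact htmin _ (List.getElem_mem hj)
    simpa using by omega
  have hmapfst : ((PySem.List.enumerate food_times 0).map (fun p : Int × Int => p.1))
      = PySem.List.pyRange 0 (food_times.length : Int) 1 := by
    rw [PySem.List.map_fst_enumerate]
    norm_num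
  have hval : ∀ j : Int, 0 ≤ j → j < L →
      PySem.List.pyGetD (PySem.List.pyRange 0 (food_times.length : Int) 1) j 0 = j := by
    intro j h0 hj
    rw [PySem.List.pyGetD_eq_getElem _ 0 h0 (by
      rw [PySem.List.length_pyRange_one]
      omega)]
    rw [PySem.List.getElem_pyRange_one]
    omega
  have hlenr : ((PySem.List.pyRange 0 (food_times.length : Int) 1).length : Int) = L := by
    rw [PySem.List.length_pyRange_one]
    omega
  have heat_T : bEaten food_times T = T * L := heat_all T (le_of_lt hTt)
  -- ---- evaluate A (break at i = 0 with the wraparound read) ----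
  simp only [solution, solution_alt, pyAccumulate_eq, hs]
  rw [PySem.List.pyRange_one_cons hNpos]
  simp only [aLoop,
    show pvScan 0 (t :: rest) = (0 + t) :: pvScan (0 + t) rest from rfl,
    PySem.List.pyGetD_zero_cons]
  have hbrA : 0 + t + ((food_times.length : Int) - (0 + 1)) * t > k := by nlinarith
  rw [if_pos hbrA]
  have ht2 : 2 ≤ t := by nlinarith
  have hne2 : (t :: rest) ≠ [] := List.cons_ne_nil t rest
  have hfacc_ne : pvScan 0 (t :: rest) ≠ [] := by simp [pvScan]
  have hfacc_m : PySem.List.pyGetD ((0 + t) :: pvScan (0 + t) rest) (0 - 1 : Int) 0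
      = (t :: rest).sum := by
    show PySem.List.pyGetD (pvScan 0 (t :: rest)) (0 - 1 : Int) 0 = (t :: rest).sum
    rw [show (0 - 1 : Int) = -1 by ring, PySem.List.pyGetD_neg_one _ 0 hfacc_ne]
    have h2 := pvScan_getLast? (t :: rest) (by simp) 0
    rw [List.getLast?_eq_some_getLast hfacc_ne] at h2
    have h3 := Option.some.inj h2
    omega
  have hfood_m : PySem.List.pyGetD (t :: rest) (0 - 1 : Int) 0 = (t :: rest).getLast hne2 := by
    rw [show (0 - 1 : Int) = -1 by ring]
    exact PySem.List.pyGetD_neg_one _ 0 hne2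
  rw [if_neg (show ¬ t = -1 by omega)]
  simp only [hfacc_m, hfood_m, sub_zero]
  -- A's survivors are all indices too (t is the minimum)
  have hfilterA : (PySem.List.enumerate food_times 0).filter (fun p : Int × Int => decide (p.2 ≥ t))
      = PySem.List.enumerate food_times 0 := by
    rw [List.filter_eq_self]
    intro p hp
    obtain ⟨j, hj, hpj⟩ := (PySem.List.mem_enumerate_iff _ _ _).mp hp
    have : t ≤ p.2 := by rw [hpj]; exact htmin _ (List.getElem_mem hj)
    simpa using this
  simp only [hmx0, Option.getD_some, ← hT, hfilterA, hfilter, hmapfst, hlenr, heat_T]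
  set X : Int := (t :: rest).sum + L * (t :: rest).getLast hne2 with hX
  have hj1 := PySem.Int.mod_nonneg (k - X) hNpos
  have hj1' := PySem.Int.mod_lt (k - X) hNpos
  have hr2 : PySem.Int.mod (k - T * L) L = PySem.Int.mod k L := by
    rw [PySem.Int.mod_eq_emod_of_pos hNpos, PySem.Int.mod_eq_emod_of_pos hNpos,
      show k - T * L = k - L * T by ring]
    exact Int.sub_mul_emod_self_left _ _ _
  have hj2 := PySem.Int.mod_nonneg k hNpos
  have hj2' := PySem.Int.mod_lt k hNpos
  rw [hval _ hj1 hj1', hr2, hval _ hj2 hj2']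
  intro hEq
  have hmodeq : PySem.Int.mod (k - X) L = PySem.Int.mod k L := by omega
  rw [PySem.Int.mod_eq_emod_of_pos hNpos, PySem.Int.mod_eq_emod_of_pos hNpos] at hmodeq
  have hdvd : L ∣ X := by
    have h5 : (k - X - k) % L = 0 := by
      rw [← Int.emod_eq_emod_iff_emod_sub_eq_zero] at *
      exact hmodeq
    have h6 : L ∣ (k - X - k) := Int.dvd_of_emod_eq_zero h5
    have h7 : k - X - k = -X := by ring
    rw [h7] at h6
    exact (dvd_neg).mp h6
  have hdvds : L ∣ (t :: rest).sum := by
    have h8 : L ∣ L * (t :: rest).getLast hne2 := Dvd.intro _ rfl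
    have h9 : (t :: rest).sum = X - L * (t :: rest).getLast hne2 := by rw [hX]; ring
    rw [h9]
    exact dvd_sub hdvd h8
  rw [hperm.sum_eq] at hdvds
  exact hmod ((PySem.Int.mod_eq_zero_iff_dvd _ _).mpr hdvds)

-- ===== VERDICT (by name: the statement is the Claim_ definition above) =====
theorem solution_changed : Claim_changed_solution := by
  unfold Claim_changed_solution
  refine ⟨by decide, by decide, by decide, ?_, by decide⟩
  show solution_alt [2, 5] 2 = 1
  have hb : bSearch [2, 5] 2 0 5 = 1 := by
    rw [bSearch]
    norm_num [bEaten]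
    rw [bSearch]
    norm_num [bEaten]
    rw [bSearch]
    norm_num
  simp only [solution_alt]
  norm_num [hb, bEaten, PySem.List.max?, PySem.List.enumerate, PySem.Int.mod,
    PySem.List.pyGetD, PySem.List.pyIdx?, PySem.List.pyGet?]
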